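-- pv_equiv track=rewrite | github.com/feored/halbu-editor | static/generate_json.py | expandExpression
-- ===== SOURCE A (Python) =====
-- expandDict = {
--     "ln12" : "par1 + (lvl - 1) * par2",
--     "dm12" : "((110 * lvl) * (par2 - par1)) / (100 * (lvl + 6)) + par1",
--     "ln34" : "par3 + (lvl - 1) * par4",
--     "dm32" : "((110 * lvl) * (par4 - par3)) / (100 * (lvl + 6)) + par3",
--     "ln56" : "par5 + (lvl - 1) * par6",
--     "dm56" : "((110 * lvl) * (par6 - par5)) / (100 * (lvl + 6)) + par5",
--     "ln78" : "par7 + (lvl - 1) * par8",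
--     "dm78" : "((110 * lvl) * (par8 - par7)) / (100 * (lvl + 6)) + par7",
-- }
--
-- expandKeys = expandDict.keys()
--
-- def expandExpression(expression):
--     canExpand = True
--     while canExpand:
--         canExpand = False
--         for key in expandKeys:
--             if key in expression:
--                 expression = expression.replace(key, expandDict[key])
--                 canExpand = True
--     return expression
-- ===== SOURCE B (Python) =====
-- import re
--
-- expandDict = {
--     "ln12" : "par1 + (lvl - 1) * par2",
--     "dm12" : "((110 * lvl) * (par2 - par1)) / (100 * (lvl + 6)) + par1",
--     "ln34" : "par3 + (lvl - 1) * par4",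
--     "dm32" : "((110 * lvl) * (par4 - par3)) / (100 * (lvl + 6)) + par3",
--     "ln56" : "par5 + (lvl - 1) * par6",
--     "dm56" : "((110 * lvl) * (par6 - par5)) / (100 * (lvl + 6)) + par5",
--     "ln78" : "par7 + (lvl - 1) * par8",
--     "dm78" : "((110 * lvl) * (par8 - par7)) / (100 * (lvl + 6)) + par7",
-- }
--
-- _pattern = re.compile("|".join(map(re.escape, expandDict)))
--
-- def expandExpression(expression):
--     # One left-to-right scan: every token is replaced once via a table lookup.
--     # (No replacement value contains or overlaps a key, so one pass reaches the fixpoint.)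
--     return _pattern.sub(lambda m: expandDict[m.group(0)], expression)
-- ===== Notes on version B (the rewrite author's own statement) =====
-- stated objective: faster
-- what changed: B compiles one regex alternating all dict keys and does a single left-to-right scan replacing each token once via a table lookup (re.sub), instead of A's while-loop that repeatedly re-scans and rewrites the whole string with str.replace once per key until no key remains; equivalence holds because no replacement value contains or overlaps a key (proved via a one-pass scan characterisation of both programs).
import Mathlib
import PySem

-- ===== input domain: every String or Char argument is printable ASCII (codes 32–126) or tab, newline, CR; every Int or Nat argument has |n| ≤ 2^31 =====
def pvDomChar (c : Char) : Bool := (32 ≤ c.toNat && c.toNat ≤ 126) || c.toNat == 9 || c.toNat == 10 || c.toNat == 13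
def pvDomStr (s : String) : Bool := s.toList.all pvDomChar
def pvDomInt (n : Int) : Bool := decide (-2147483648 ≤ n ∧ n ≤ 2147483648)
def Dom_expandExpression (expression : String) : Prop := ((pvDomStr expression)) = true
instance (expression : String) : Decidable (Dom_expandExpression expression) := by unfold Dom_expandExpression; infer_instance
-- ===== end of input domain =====

-- B replaces A's fixpoint while-loop of per-key whole-string str.replace passes by a single
-- left-to-right scan substituting each key token once via a table lookup (re.sub in Source B).

-- ===== PORT A =====
-- the module-level dict, as an association list in insertion order
def expandDictA : List (String × String) := [
  ("ln12", "par1 + (lvl - 1) * par2"),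
  ("dm12", "((110 * lvl) * (par2 - par1)) / (100 * (lvl + 6)) + par1"),
  ("ln34", "par3 + (lvl - 1) * par4"),
  ("dm32", "((110 * lvl) * (par4 - par3)) / (100 * (lvl + 6)) + par3"),
  ("ln56", "par5 + (lvl - 1) * par6"),
  ("dm56", "((110 * lvl) * (par6 - par5)) / (100 * (lvl + 6)) + par5"),
  ("ln78", "par7 + (lvl - 1) * par8"),
  ("dm78", "((110 * lvl) * (par8 - par7)) / (100 * (lvl + 6)) + par7")]

-- body of A's `for key in expandKeys` loop
def expandStep (st : String × Bool) (kv : String × String) : String × Bool :=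
  if PySem.Str.isIn kv.1 st.1 then (PySem.Str.replace st.1 kv.1 kv.2, true) else st

-- one iteration of A's while-loop body: canExpand = False; for key in expandKeys: …
def expandPass (e : String) : String × Bool :=
  expandDictA.foldl expandStep (e, false)

-- A's `while canExpand` loop; the fuel only makes it total (a changing pass removes every
-- key — proved below — so any fuel ≥ 2, and ≥ 1 for a keyless string, suffices).
def expandLoop : Nat → String → String
  | 0, e => e
  | fuel + 1, e =>
    let p := expandPass e
    if p.2 then expandLoop fuel p.1 else p.1

def expandExpression (expression : String) : String :=
  expandLoop ((PySem.Str.len expression).toNat + 1) expression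

-- ===== PORT B =====
-- the dict read on the character level (keys/values as char lists)
def expandTableB : List (List Char × List Char) :=
  expandDictA.map (fun kv => (kv.1.toList, kv.2.toList))

-- exact port of `_pattern.sub(lambda m: expandDict[m.group(0)], expression)`:
-- a single left-to-right scan; at each position re tries the alternatives (the dict keys)
-- in order, replaces the matched token by its dict value and resumes after it,
-- otherwise one character is copied.  (keys are nonempty: the drop is `length` chars)
def subScan : List Char → List Char
  | [] => []
  | c :: t =>
    match expandTableB.find? (fun kv => kv.1.isPrefixOf (c :: t)) with
    | some kv => kv.2 ++ subScan (t.drop (kv.1.length - 1))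
    | none => c :: subScan t
termination_by l => l.length
decreasing_by all_goals (simp; try omega)

def expandExpression_alt (expression : String) : String :=
  String.ofList (subScan expression.toList)

-- ===== PRECONDITION & SPEC =====
def Spec_expandExpression (expression : String) (out : String) : Prop := out = expandExpression_alt expression
instance (expression : String) (out : String) : Decidable (Spec_expandExpression expression out) := by unfold Spec_expandExpression; infer_instance

-- ===== CLAIM (what is proved, stated in full; the proofs are below) =====
def Claim_equal_expandExpression : Prop := ∀ (expression : String), Dom_expandExpression expression → Spec_expandExpression expression (expandExpression expression)

-- ===== LEMMAS AND PROOFS =====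

-- clean form of Python str.replace for a nonempty pattern k
def rep (k v : List Char) : List Char → List Char
  | [] => []
  | c :: t =>
    if k.isPrefixOf (c :: t) then v ++ rep k v (t.drop (k.length - 1)) else c :: rep k v t
termination_by l => l.length
decreasing_by all_goals (simp; try omega)

-- the generic one-pass scan over a table prefix (proof device; subScan = scanT expandTableB)
def scanT (ts : List (List Char × List Char)) : List Char → List Char
  | [] => []
  | c :: t =>
    match ts.find? (fun kv => kv.1.isPrefixOf (c :: t)) with
    | some kv => kv.2 ++ scanT ts (t.drop (kv.1.length - 1))
    | none => c :: scanT ts t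
termination_by l => l.length
decreasing_by all_goals (simp; try omega)

-- side conditions on the fixed table (decided once, below)
def NOccur (k w : List Char) : Prop := ∀ u ∈ w.tails, ¬ k <+: u
def NPre (k w : List Char) : Prop := ∀ u ∈ w.tails, u ≠ [] → ¬ u <+: k
def NStart (k w : List Char) : Prop := ∀ u ∈ k.tails, u ≠ [] → ¬ u <+: w
def NOverlap (k k' : List Char) : Prop := ∀ u ∈ k.tails, u ≠ [] → u ≠ k → ¬ u <+: k'

def GoodT (ts : List (List Char × List Char)) : Prop :=
  (ts.map Prod.fst).Nodup ∧
  (∀ kv ∈ ts, kv.1.length = 4 ∧ 4 ≤ kv.2.length) ∧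
  (∀ kv ∈ ts, ∀ kv' ∈ ts, NOccur kv.1 kv'.2 ∧ NPre kv.1 kv'.2 ∧ NStart kv.1 kv'.2 ∧ NOverlap kv.1 kv'.1)

lemma goodT_table : GoodT expandTableB := by
  unfold GoodT NOccur NPre NStart NOverlap expandTableB expandDictA
  decide

-- suffix-quantified forms
lemma nOccur_iff (k w : List Char) : NOccur k w ↔ ∀ u, u <:+ w → ¬ k <+: u := by
  unfold NOccur; simp [List.mem_tails]

lemma nPre_iff (k w : List Char) : NPre k w ↔ ∀ u, u <:+ w → u ≠ [] → ¬ u <+: k := by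
  unfold NPre; simp [List.mem_tails]

lemma nStart_iff (k w : List Char) : NStart k w ↔ ∀ u, u <:+ k → u ≠ [] → ¬ u <+: w := by
  unfold NStart; simp [List.mem_tails]

lemma nOverlap_iff (k k' : List Char) :
    NOverlap k k' ↔ ∀ u, u <:+ k → u ≠ [] → u ≠ k → ¬ u <+: k' := by
  unfold NOverlap; simp [List.mem_tails]

-- unfolding lemmas
lemma rep_nil (k v : List Char) : rep k v [] = [] := by simp [rep]

lemma rep_cons_pos (k v : List Char) (c : Char) (t : List Char) (h : k <+: c :: t) :
    rep k v (c :: t) = v ++ rep k v (t.drop (k.length - 1)) := by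
  rw [rep]; simp [List.isPrefixOf_iff_prefix, h]

lemma rep_cons_neg (k v : List Char) (c : Char) (t : List Char) (h : ¬ k <+: c :: t) :
    rep k v (c :: t) = c :: rep k v t := by
  rw [rep]; simp [List.isPrefixOf_iff_prefix, h]

lemma scanT_nil (ts : List (List Char × List Char)) : scanT ts [] = [] := by simp [scanT]

lemma scanT_cons_pos (ts : List (List Char × List Char)) (c : Char) (t : List Char)
    (kv : List Char × List Char)
    (h : ts.find? (fun kv => kv.1.isPrefixOf (c :: t)) = some kv) :
    scanT ts (c :: t) = kv.2 ++ scanT ts (t.drop (kv.1.length - 1)) := by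
  rw [scanT, h]

lemma scanT_cons_neg (ts : List (List Char × List Char)) (c : Char) (t : List Char)
    (h : ts.find? (fun kv => kv.1.isPrefixOf (c :: t)) = none) :
    scanT ts (c :: t) = c :: scanT ts t := by
  rw [scanT, h]

lemma subScan_eq_scanT (l : List Char) : subScan l = scanT expandTableB l := by
  induction l using subScan.induct with
  | case1 => simp [subScan, scanT]
  | case2 c t kv h ih => rw [subScan, scanT, h]; simp [ih]
  | case3 c t h ih => rw [subScan, scanT, h]; simp [ih]

-- str.replace (nonempty pattern) is rep
lemma go_eq_rep (k v : List Char) (hk : k ≠ []) :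
    ∀ (fuel : Nat) (l acc : List Char), l.length ≤ fuel →
      PySem.Chars.replace.go k v fuel l acc = acc.reverse ++ rep k v l := by
  intro fuel
  induction fuel with
  | zero =>
    intro l acc h
    have hl : l = [] := List.eq_nil_of_length_eq_zero (Nat.le_zero.1 h)
    subst hl
    simp [PySem.Chars.replace.go, rep_nil]
  | succ n ih =>
    intro l acc h
    cases l with
    | nil => simp [PySem.Chars.replace.go, rep_nil]
    | cons c t =>
      rw [PySem.Chars.replace.go]
      by_cases hp : k <+: c :: t
      · rw [if_pos (List.isPrefixOf_iff_prefix.2 hp)]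
        obtain ⟨a, k', rfl⟩ : ∃ a k', k = a :: k' := by
          cases k with
          | nil => exact absurd rfl hk
          | cons a k' => exact ⟨a, k', rfl⟩
        have hdrop : List.drop (a :: k').length (c :: t) = t.drop ((a :: k').length - 1) := by
          simp
        rw [hdrop, ih _ _ (by simp at h ⊢; omega), rep_cons_pos _ _ _ _ hp]
        simp
      · rw [if_neg (fun hh => hp (List.isPrefixOf_iff_prefix.1 hh))]
        rw [ih t (c :: acc) (by simp at h ⊢; omega), rep_cons_neg _ _ _ _ hp]
        simp

lemma replace_eq_rep (k v l : List Char) (hk : k ≠ []) :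
    PySem.Chars.replace l k v = rep k v l := by
  unfold PySem.Chars.replace
  rw [if_neg (by simp [hk])]
  simpa using go_eq_rep k v hk l.length l [] le_rfl

-- prefix facts
lemma prefix_left_of_le {u w t : List Char} (h : u <+: w ++ t) (hl : u.length ≤ w.length) :
    u <+: w := by
  have hu : u = (w ++ t).take u.length := List.prefix_iff_eq_take.1 h
  rw [List.take_append_of_le_length hl] at hu
  rw [hu]
  exact List.take_prefix _ _

lemma short_prefix {k w t : List Char} (h : k <+: w ++ t) (hl : w.length ≤ k.length) :
    w <+: k := by
  rcases List.prefix_or_prefix_of_prefix (List.prefix_append w t) h with hc | hc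
  · exact hc
  · have : k = w := hc.eq_of_length (le_antisymm hc.length_le hl)
    simp [this]

-- rep does nothing on a string its pattern does not occur in
lemma rep_id (k v : List Char) :
    ∀ l : List Char, ¬ (k <:+: l) → rep k v l = l := by
  intro l
  induction l with
  | nil => intro _; exact rep_nil k v
  | cons c t ih =>
    intro h
    have hp : ¬ k <+: c :: t := fun hp => h hp.isInfix
    rw [rep_cons_neg _ _ _ _ hp, ih (fun hi => h (hi.trans (List.suffix_cons c t).isInfix))]

-- pushing rep through an emitted value
lemma rep_append (k v : List Char) :
    ∀ (w t : List Char), (∀ u, u <:+ w → ¬ k <+: u) → (∀ u, u <:+ w → u ≠ [] → ¬ u <+: k) →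
      rep k v (w ++ t) = w ++ rep k v t := by
  intro w
  induction w with
  | nil => intro t _ _; simp
  | cons c w' ih =>
    intro t h1 h2
    have hp : ¬ k <+: (c :: w') ++ t := by
      intro hp
      by_cases hlen : k.length ≤ (c :: w').length
      · exact h1 (c :: w') (List.suffix_refl _) (prefix_left_of_le hp hlen)
      · exact h2 (c :: w') (List.suffix_refl _) (by simp) (short_prefix hp (by omega))
    rw [List.cons_append, rep_cons_neg _ _ _ _ (by simpa using hp)]
    rw [ih t (fun u hu => h1 u (hu.trans (List.suffix_cons c w')))
          (fun u hu => h2 u (hu.trans (List.suffix_cons c w')))]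
    simp

-- destructuring a 4-character key
lemma key4 {k : List Char} (h : k.length = 4) : ∃ a b c d, k = [a, b, c, d] := by
  rcases k with _ | ⟨a, k⟩; · simp at h
  rcases k with _ | ⟨b, k⟩; · simp at h
  rcases k with _ | ⟨c, k⟩; · simp at h
  rcases k with _ | ⟨d, k⟩; · simp at h
  rcases k with _ | ⟨e, k⟩; · exact ⟨a, b, c, d, rfl⟩
  · simp at h

-- the scan copies a foreign key verbatim
lemma scan_copy_key (ts : List (List Char × List Char)) (k r : List Char)
    (hlen : k.length = 4)
    (h0 : ts.find? (fun kv => kv.1.isPrefixOf (k ++ r)) = none)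
    (hov : ∀ kv ∈ ts, NOverlap k kv.1) (hk4 : ∀ kv ∈ ts, kv.1.length = 4) :
    scanT ts (k ++ r) = k ++ scanT ts r := by
  obtain ⟨a, b, c, d, rfl⟩ := key4 hlen
  have hstep : ∀ (u : List Char), u <:+ [a, b, c, d] → u ≠ [a, b, c, d] → u ≠ [] →
      ∀ (r' : List Char), ts.find? (fun kv => kv.1.isPrefixOf (u ++ r')) = none := by
    intro u hsuf hne hnil r'
    rw [List.find?_eq_none]
    intro kv hkv hpre
    have hpre' : kv.1 <+: u ++ r' := List.isPrefixOf_iff_prefix.1 hpre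
    have hul : u.length ≤ kv.1.length := by
      have h1 : u.length ≤ 4 := by simpa using hsuf.length_le
      have h4 := hk4 kv hkv
      by_contra hcon
      omega
    have := short_prefix hpre' hul
    exact (nOverlap_iff _ _).1 (hov kv hkv) u hsuf hnil hne this
  have e1 := scanT_cons_neg ts a ([b, c, d] ++ r) (by simpa using h0)
  have e2 := scanT_cons_neg ts b ([c, d] ++ r)
    (by simpa using hstep [b, c, d] ⟨[a], rfl⟩ (by simp) (by simp) r)
  have e3 := scanT_cons_neg ts c ([d] ++ r)
    (by simpa using hstep [c, d] ⟨[a, b], rfl⟩ (by simp) (by simp) r)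
  have e4 := scanT_cons_neg ts d r
    (by simpa using hstep [d] ⟨[a, b, c], rfl⟩ (by simp) (by simp) r)
  simp only [List.cons_append, List.nil_append] at e1 e2 e3 e4 ⊢
  rw [e1, e2, e3, e4]

-- a nonempty suffix of a key is a prefix of the scan output only where it already was one
lemma scan_no_new_prefix (ts : List (List Char × List Char)) (k : List Char)
    (hlen : k.length = 4)
    (hv : ∀ kv ∈ ts, 4 ≤ kv.2.length ∧ NStart k kv.2) :
    ∀ (l u : List Char), u <:+ k → u ≠ [] → u <+: scanT ts l → u <+: l := by
  have main : ∀ (n : Nat) (l : List Char), l.length ≤ n → ∀ u, u <:+ k → u ≠ [] →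
      u <+: scanT ts l → u <+: l := by
    intro n
    induction n with
    | zero =>
      intro l hn u _ hne hpre
      have : l = [] := List.eq_nil_of_length_eq_zero (Nat.le_zero.1 hn)
      subst this
      rw [scanT_nil] at hpre
      exact absurd (List.prefix_nil.1 hpre) hne
    | succ n ih =>
      intro l hn u hsuf hne hpre
      cases l with
      | nil =>
        rw [scanT_nil] at hpre
        exact absurd (List.prefix_nil.1 hpre) hne
      | cons c t =>
        rcases hf : ts.find? (fun kv => kv.1.isPrefixOf (c :: t)) with _ | kv
        · rw [scanT_cons_neg _ _ _ hf] at hpre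
          cases u with
          | nil => exact absurd rfl hne
          | cons u0 u' =>
            obtain ⟨hu0, hpre'⟩ := by simpa using (List.cons_prefix_cons.1 hpre)
            subst hu0
            cases u' with
            | nil => simp
            | cons u1 u'' =>
              have hsuf' : u1 :: u'' <:+ k :=
                (List.suffix_cons u0 (u1 :: u'')).trans hsuf
              have := ih t (by simp at hn; omega) (u1 :: u'') hsuf' (by simp) hpre'
              exact List.cons_prefix_cons.2 ⟨rfl, this⟩
        · rw [scanT_cons_pos _ _ _ _ hf] at hpre
          have hkv := ts.mem_of_find?_eq_some hf
          have h4 := (hv kv hkv).1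
          have hul : u.length ≤ kv.2.length := by
            have := hsuf.length_le
            omega
          have := prefix_left_of_le hpre hul
          exact absurd this ((nStart_iff _ _).1 (hv kv hkv).2 u hsuf hne)
  exact fun l => main l.length l le_rfl

-- occurrence as a prefix of some drop
lemma infix_iff_drop (k m : List Char) : k <:+: m ↔ ∃ j : Nat, k <+: m.drop j := by
  constructor
  · rintro ⟨s, t, rfl⟩
    exact ⟨s.length, by simp [List.prefix_append]⟩
  · rintro ⟨j, hj⟩
    exact hj.isInfix.trans (m.drop_suffix j).isInfix

-- no key of the table occurs in the scan output
lemma scan_no_occur (ts : List (List Char × List Char)) (hG : GoodT ts)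
    (kv : List Char × List Char) (hmem : kv ∈ ts) :
    ∀ l : List Char, ¬ (kv.1 <:+: scanT ts l) := by
  obtain ⟨hnd, hlen, hpair⟩ := hG
  have hk4 : kv.1.length = 4 := (hlen kv hmem).1
  have main : ∀ (n : Nat) (l : List Char), l.length ≤ n → ¬ (kv.1 <:+: scanT ts l) := by
    intro n
    induction n with
    | zero =>
      intro l hn hin
      have : l = [] := List.eq_nil_of_length_eq_zero (Nat.le_zero.1 hn)
      subst this
      rw [scanT_nil] at hin
      have := List.eq_nil_of_infix_nil hin
      simp [this] at hk4
    | succ n ih =>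
      intro l hn hin
      cases l with
      | nil =>
        rw [scanT_nil] at hin
        have := List.eq_nil_of_infix_nil hin
        simp [this] at hk4
      | cons c t =>
        rcases hf : ts.find? (fun kv => kv.1.isPrefixOf (c :: t)) with _ | kv'
        · rw [scanT_cons_neg _ _ _ hf] at hin
          obtain ⟨j, hj⟩ := (infix_iff_drop _ _).1 hin
          cases j with
          | zero =>
            rw [List.drop_zero, ← scanT_cons_neg _ _ _ hf] at hj
            have := scan_no_new_prefix ts kv.1 hk4
              (fun kv' h' => ⟨(hlen kv' h').2, (hpair kv hmem kv' h').2.2.1⟩)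
              (c :: t) kv.1 (List.suffix_refl _) (by intro h; simp [h] at hk4) hj
            have hnone := List.find?_eq_none.1 hf kv hmem
            exact hnone (List.isPrefixOf_iff_prefix.2 this)
          | succ j =>
            have hj' : kv.1 <+: (scanT ts t).drop j := by simpa using hj
            exact ih t (by simp at hn; omega) ((infix_iff_drop _ _).2 ⟨j, hj'⟩)
        · rw [scanT_cons_pos _ _ _ _ hf] at hin
          have hkv' := ts.mem_of_find?_eq_some hf
          obtain ⟨j, hj⟩ := (infix_iff_drop _ _).1 hin
          by_cases hle : j ≤ kv'.2.length
          · rw [List.drop_append_of_le_length hle] at hj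
            by_cases hlong : kv.1.length ≤ (kv'.2.drop j).length
            · have := prefix_left_of_le hj hlong
              exact (nOccur_iff _ _).1 (hpair kv hmem kv' hkv').1 _ (kv'.2.drop_suffix j) this
            · rcases hd : kv'.2.drop j with _ | ⟨x, xs⟩
              · rw [hd] at hj
                simp at hj
                have : (List.drop (kv'.1.length - 1) t).length ≤ n := by
                  simp at hn ⊢; omega
                exact ih _ this ((infix_iff_drop _ _).2 ⟨0, by simpa using hj⟩)
              · rw [hd] at hj hlong
                have := short_prefix hj (by omega)
                exact (nPre_iff _ _).1 (hpair kv hmem kv' hkv').2.1 (x :: xs)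
                  (hd ▸ kv'.2.drop_suffix j) (by simp) this
          · have hsplit : (kv'.2 ++ scanT ts (t.drop (kv'.1.length - 1))).drop j
                = (scanT ts (t.drop (kv'.1.length - 1))).drop (j - kv'.2.length) := by
              have h1 : ((kv'.2 ++ scanT ts (t.drop (kv'.1.length - 1))).drop kv'.2.length).drop
                  (j - kv'.2.length) = (kv'.2 ++ scanT ts (t.drop (kv'.1.length - 1))).drop j := by
                rw [List.drop_drop]
                congr 1
                omega
              rw [← h1, List.drop_left]
            rw [hsplit] at hj
            have : (List.drop (kv'.1.length - 1) t).length ≤ n := by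
              simp at hn ⊢; omega
            exact ih _ this ((infix_iff_drop _ _).2 ⟨j - kv'.2.length, hj⟩)
  exact fun l => main l.length l le_rfl

-- replacing one more key in the scan output extends the scan's table
lemma compose (ts : List (List Char × List Char)) (kv : List Char × List Char)
    (hG : GoodT (ts ++ [kv])) :
    ∀ l : List Char, rep kv.1 kv.2 (scanT ts l) = scanT (ts ++ [kv]) l := by
  obtain ⟨hnd, hlen, hpair⟩ := hG
  have hmem : kv ∈ ts ++ [kv] := by simp
  have hmem' : ∀ kv' ∈ ts, kv' ∈ ts ++ [kv] := fun kv' h => by simp [h]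
  have hk4 : kv.1.length = 4 := (hlen kv hmem).1
  have hkne : kv.1 ≠ [] := by intro h; simp [h] at hk4
  have main : ∀ (n : Nat) (l : List Char), l.length ≤ n →
      rep kv.1 kv.2 (scanT ts l) = scanT (ts ++ [kv]) l := by
    intro n
    induction n with
    | zero =>
      intro l hn
      have : l = [] := List.eq_nil_of_length_eq_zero (Nat.le_zero.1 hn)
      subst this
      rw [scanT_nil, scanT_nil, rep_nil]
    | succ n ih =>
      intro l hn
      cases l with
      | nil => rw [scanT_nil, scanT_nil, rep_nil]
      | cons c t =>
        rcases hf : ts.find? (fun kv => kv.1.isPrefixOf (c :: t)) with _ | kv'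
        · by_cases hkp : kv.1 <+: c :: t
          · -- our key matches here
            obtain ⟨r, hr⟩ := hkp
            have hfapp : (ts ++ [kv]).find? (fun kv' => kv'.1.isPrefixOf (c :: t)) = some kv := by
              rw [List.find?_append, hf]
              simp [List.isPrefixOf_iff_prefix, hr ▸ List.prefix_append kv.1 r]
            have hcopy : scanT ts (kv.1 ++ r) = kv.1 ++ scanT ts r := by
              apply scan_copy_key ts kv.1 r hk4 (hr ▸ hf)
              · exact fun kv' h' => (hpair kv hmem kv' (hmem' kv' h')).2.2.2
              · exact fun kv' h' => (hlen kv' (hmem' kv' h')).1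
            obtain ⟨a, b2, c2, d2, hk⟩ := key4 hk4
            have hr' : c :: t = kv.1 ++ r := hr.symm
            have hlr : r.length ≤ n := by
              have := congrArg List.length hr'
              simp [hk4] at this hn
              omega
            have hrep : rep kv.1 kv.2 (kv.1 ++ scanT ts r)
                = kv.2 ++ rep kv.1 kv.2 (scanT ts r) := by
              rw [hk, List.cons_append,
                rep_cons_pos _ _ _ _ (by rw [← List.cons_append]; exact List.prefix_append _ _)]
              simp
            have hRHS : scanT (ts ++ [kv]) (c :: t) = kv.2 ++ scanT (ts ++ [kv]) r := by
              rw [scanT_cons_pos _ _ _ _ hfapp]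
              have ht : t = [b2, c2, d2] ++ r := by
                rw [hk] at hr'
                simp only [List.cons_append, List.nil_append] at hr'
                injection hr' with h1 h2
              rw [ht, hk]
              simp
            rw [hr', hcopy, hrep, ih r hlr, ← hr', hRHS]
          · -- no key matches here
            have hfapp : (ts ++ [kv]).find? (fun kv' => kv'.1.isPrefixOf (c :: t)) = none := by
              rw [List.find?_append, hf]
              simp [List.isPrefixOf_iff_prefix, hkp]
            rw [scanT_cons_neg _ _ _ hf, scanT_cons_neg _ _ _ hfapp]
            have hnp : ¬ kv.1 <+: c :: scanT ts t := by
              intro hpre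
              rw [← scanT_cons_neg _ _ _ hf] at hpre
              exact hkp (scan_no_new_prefix ts kv.1 hk4
                (fun kv' h' => ⟨(hlen kv' (hmem' kv' h')).2,
                  (hpair kv hmem kv' (hmem' kv' h')).2.2.1⟩)
                (c :: t) kv.1 (List.suffix_refl _) hkne hpre)
            rw [rep_cons_neg _ _ _ _ hnp, ih t (by simp at hn; omega)]
        · -- an earlier key matches: push rep through its value
          have hkv' := ts.mem_of_find?_eq_some hf
          have hfapp : (ts ++ [kv]).find? (fun kv'' => kv''.1.isPrefixOf (c :: t)) = some kv' := by
            rw [List.find?_append, hf]; rfl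
          rw [scanT_cons_pos _ _ _ _ hf, scanT_cons_pos _ _ _ _ hfapp]
          rw [rep_append kv.1 kv.2 kv'.2 _
            ((nOccur_iff _ _).1 (hpair kv hmem kv' (hmem' kv' hkv')).1)
            ((nPre_iff _ _).1 (hpair kv hmem kv' (hmem' kv' hkv')).2.1)]
          rw [ih _ (by simp at hn ⊢; omega)]
  exact fun l => main l.length l le_rfl

lemma goodT_append_left (ts ts' : List (List Char × List Char)) (h : GoodT (ts ++ ts')) :
    GoodT ts := by
  obtain ⟨hnd, hlen, hpair⟩ := h
  refine ⟨?_, fun kv h' => hlen kv (by simp [h']), fun kv h' kv' h'' => hpair kv (by simp [h']) kv' (by simp [h''])⟩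
  rw [List.map_append] at hnd
  exact ((ts.map Prod.fst).sublist_append_left (ts'.map Prod.fst)).nodup hnd

lemma scanT_nil_table (l : List Char) : scanT [] l = l := by
  induction l with
  | nil => exact scanT_nil []
  | cons c t ih => rw [scanT_cons_neg [] c t (by simp), ih]

-- folding rep over the whole table is the full one-pass scan
lemma foldl_rep_chain :
    ∀ (ts done : List (List Char × List Char)), GoodT (done ++ ts) →
      ∀ l : List Char,
        ts.foldl (fun s kv => rep kv.1 kv.2 s) (scanT done l) = scanT (done ++ ts) l := by
  intro ts
  induction ts with
  | nil => intro done _ l; simp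
  | cons kv ts' ih =>
    intro done hG l
    have hassoc : done ++ kv :: ts' = (done ++ [kv]) ++ ts' := by simp
    rw [List.foldl_cons,
      compose done kv (goodT_append_left (done ++ [kv]) ts' (by rw [← hassoc]; exact hG)) l]
    rw [hassoc] at hG ⊢
    exact ih (done ++ [kv]) hG l

lemma foldl_rep_eq_scan (l : List Char) :
    expandTableB.foldl (fun s kv => rep kv.1 kv.2 s) l = scanT expandTableB l := by
  have := foldl_rep_chain expandTableB [] (by simpa using goodT_table) l
  simpa [scanT_nil_table] using this

-- ===== A-side bridging =====

lemma table_keys_nonempty (kv : String × String) (h : kv ∈ expandDictA) : kv.1.toList ≠ [] := by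
  have hmem : (kv.1.toList, kv.2.toList) ∈ expandTableB := List.mem_map.2 ⟨kv, h, rfl⟩
  have := (goodT_table.2.1 _ hmem).1
  intro hnil
  simp [hnil] at this

lemma foldl_keep (ts : List (String × String)) (x : String) (b : Bool)
    (h : ∀ kv ∈ ts, PySem.Str.isIn kv.1 x = false) :
    ts.foldl expandStep (x, b) = (x, b) := by
  induction ts with
  | nil => rfl
  | cons kv ts' ih =>
    rw [List.foldl_cons]
    have hstep : expandStep (x, b) kv = (x, b) := by
      have hin := h kv (by simp)
      rw [PySem.Str.isIn_eq] at hin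
      unfold expandStep
      simp [hin]
    rw [hstep]
    exact ih (fun kv' h' => h kv' (by simp [h']))

lemma pass_fst_toList (ts : List (String × String)) (hts : ∀ kv ∈ ts, kv.1.toList ≠ []) :
    ∀ (e : String) (b : Bool),
      ((ts.foldl expandStep (e, b)).1).toList =
        (ts.map (fun kv => (kv.1.toList, kv.2.toList))).foldl
          (fun s kv => rep kv.1 kv.2 s) e.toList := by
  induction ts with
  | nil => intro e b; rfl
  | cons kv ts' ih =>
    intro e b
    rw [List.map_cons, List.foldl_cons, List.foldl_cons]
    rcases hin : PySem.Str.isIn kv.1 e with _ | _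
    · have hstep : expandStep (e, b) kv = (e, b) := by
        have hin' := hin
        rw [PySem.Str.isIn_eq] at hin'
        unfold expandStep; simp [hin']
      rw [hstep, ih (fun kv' h' => hts kv' (by simp [h'])) e b]
      have hnin : ¬ (kv.1.toList <:+: e.toList) := by
        intro hinf
        have := (PySem.Str.isIn_iff_infix _ _).2 hinf
        rw [hin] at this
        simp at this
      rw [rep_id _ _ _ hnin]
    · have hstep : expandStep (e, b) kv = (PySem.Str.replace e kv.1 kv.2, true) := by
        have hin' := hin
        rw [PySem.Str.isIn_eq] at hin'
        unfold expandStep; simp [hin']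
      rw [hstep, ih (fun kv' h' => hts kv' (by simp [h'])) _ true]
      rw [PySem.Str.toList_replace, replace_eq_rep _ _ _ (hts kv (by simp))]

lemma pass_fst (e : String) : ((expandPass e).1).toList = scanT expandTableB e.toList := by
  unfold expandPass
  rw [pass_fst_toList expandDictA table_keys_nonempty e false]
  exact foldl_rep_eq_scan e.toList

lemma isIn_false_of_no_occur (sub s : String) (h : ¬ (sub.toList <:+: s.toList)) :
    PySem.Str.isIn sub s = false := by
  rcases hin : PySem.Str.isIn sub s with _ | _
  · rfl
  · exact absurd ((PySem.Str.isIn_iff_infix _ _).1 hin) h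

lemma main_toList (e : String) :
    (expandExpression e).toList = scanT expandTableB e.toList := by
  unfold expandExpression
  rcases hc : (expandPass e).2 with _ | _
  · -- no key present: loop body runs once, string unchanged
    have hrun : expandLoop ((PySem.Str.len e).toNat + 1) e = (expandPass e).1 := by
      rw [expandLoop]
      simp [hc]
    rw [hrun, pass_fst]
  · -- some key replaced: the pass output is key-free, second pass stops
    have habs : ∀ kv ∈ expandDictA, PySem.Str.isIn kv.1 (expandPass e).1 = false := by
      intro kv hkv
      apply isIn_false_of_no_occur
      rw [pass_fst]
      exact scan_no_occur expandTableB goodT_table (kv.1.toList, kv.2.toList)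
        (List.mem_map.2 ⟨kv, hkv, rfl⟩) e.toList
    have hne : e.toList ≠ [] := by
      intro hnil
      have : ∀ kv ∈ expandDictA, PySem.Str.isIn kv.1 e = false := by
        intro kv hkv
        apply isIn_false_of_no_occur
        rw [hnil]
        intro hinf
        exact table_keys_nonempty kv hkv (List.eq_nil_of_infix_nil hinf)
      have := foldl_keep expandDictA e false this
      unfold expandPass at hc
      rw [this] at hc
      simp at hc
    have hlen1 : 1 ≤ (PySem.Str.len e).toNat := by
      rw [PySem.Str.len_eq]
      cases hl : e.toList with
      | nil => exact absurd hl hne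
      | cons a t => simp
    obtain ⟨m, hm⟩ : ∃ m, (PySem.Str.len e).toNat = m + 1 :=
      ⟨(PySem.Str.len e).toNat - 1, by omega⟩
    rw [hm]
    have hstop : expandPass (expandPass e).1 = ((expandPass e).1, false) :=
      foldl_keep expandDictA (expandPass e).1 false habs
    rw [expandLoop]
    simp only [hc, if_pos]
    rw [expandLoop]
    simp [hstop, pass_fst]

-- ===== VERDICT (by name: the statement is the Claim_ definition above) =====
theorem expandExpression_spec : Claim_equal_expandExpression := by
  intro e _
  unfold Spec_expandExpression expandExpression_alt
  have h : (expandExpression e).toList = subScan e.toList := by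
    rw [main_toList e, subScan_eq_scanT]
  rw [← h, String.ofList_toList]
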